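-- pv_equiv track=rewrite | github.com/zilohumberto/collect-stock-info | collect_strategies/min.py | process
-- ===== SOURCE A (Python) =====
-- from typing import Any, Sequence, MutableMapping
--
-- def process(api_results: Sequence[MutableMapping[str, Any]]) -> MutableMapping[str, Any]:
--     min_dict = {}
--     for api_result in api_results:
--         for key, value in api_result.items():
--             if key not in min_dict:
--                 min_dict[key] = api_result[key]
--             else:
--                 min_dict[key] = min(min_dict[key], api_result[key])
--
--     return min_dict
-- ===== SOURCE B (Python) =====
-- from typing import Any, Sequence, MutableMapping
--
-- def process(api_results: Sequence[MutableMapping[str, Any]]) -> MutableMapping[str, Any]: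
--     # Pass 1: group every value under its key, preserving first-appearance key order.
--     grouped = {}
--     for api_result in api_results:
--         for key, value in api_result.items():
--             grouped.setdefault(key, []).append(value)
--     # Pass 2: aggregate each group with min.
--     return {key: min(values) for key, values in grouped.items()}
-- ===== Notes on version B (the rewrite author's own statement) =====
-- stated objective: alternative
-- what changed: Replaces the running min(acc, value) reduction inside the scan by a two-pass group-then-aggregate structure: first collect all values per key into lists, then build the result as {key: min(values)}.
import Mathlib
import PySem

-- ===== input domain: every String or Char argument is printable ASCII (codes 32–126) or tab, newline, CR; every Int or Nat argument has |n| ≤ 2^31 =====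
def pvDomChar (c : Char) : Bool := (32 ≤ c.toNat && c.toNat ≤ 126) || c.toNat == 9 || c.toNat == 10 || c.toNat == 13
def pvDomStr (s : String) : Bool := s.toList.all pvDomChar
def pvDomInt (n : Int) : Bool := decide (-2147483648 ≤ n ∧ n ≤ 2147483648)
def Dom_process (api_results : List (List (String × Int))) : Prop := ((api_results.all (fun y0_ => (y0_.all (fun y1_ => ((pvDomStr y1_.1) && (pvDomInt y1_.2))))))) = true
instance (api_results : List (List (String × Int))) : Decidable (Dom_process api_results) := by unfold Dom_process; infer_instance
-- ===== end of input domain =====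

-- B replaces A's running min(acc, value) reduction by a two-pass group-values-per-key
-- then aggregate-with-min structure (same cost; alternative decomposition).


-- ===== PORT A =====
-- each inner list stands for a Python dict: PySem.Dict.ofList gives its dict semantics
-- (duplicate keys collapse, last value wins) before '.items()' is iterated.
def process (api_results : List (List (String × Int))) : List (String × Int) :=
  (api_results.foldl (fun min_dict api_result =>
      (PySem.Dict.ofList api_result).items.foldl (fun md p =>
        if md.contains p.1 = false then md.insert p.1 p.2
        else md.insert p.1 (min (md.getD p.1 0) p.2)) min_dict)
    PySem.Dict.empty).items

-- ===== PORT B =====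
-- Python's min(values): 'values' is always nonempty here, the [] case is unreachable.
def pyMinList (vs : List Int) : Int :=
  match vs with
  | [] => 0
  | h :: t => t.foldl min h

def process_alt (api_results : List (List (String × Int))) : List (String × Int) :=
  let grouped := api_results.foldl (fun g api_result =>
      (PySem.Dict.ofList api_result).items.foldl
        (fun d p => d.modify p.1 [] fun x => x ++ [p.2]) g)
    PySem.Dict.empty
  grouped.items.map (fun p => (p.1, pyMinList p.2))

-- ===== PRECONDITION & SPEC =====
def Spec_process (api_results : List (List (String × Int))) (out : List (String × Int)) : Prop := out = process_alt api_results
instance (api_results : List (List (String × Int))) (out : List (String × Int)) : Decidable (Spec_process api_results out) := by unfold Spec_process; infer_instance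

-- ===== CLAIM (what is proved, stated in full; the proofs are below) =====
def Claim_equal_process : Prop := ∀ (api_results : List (List (String × Int))), Dom_process api_results → Spec_process api_results (process api_results)

-- ===== LEMMAS AND PROOFS =====

-- a nested loop is the loop over the concatenation
theorem foldl_foldl_flatMap {α β σ : Type} (g : α → List β) (step : σ → β → σ)
    (l : List α) (init : σ) :
    l.foldl (fun s a => (g a).foldl step s) init = (l.flatMap g).foldl step init := by
  induction l generalizing init with
  | nil => rfl
  | cons a l ih => simp [List.flatMap_cons, List.foldl_append, ih]

-- A's loop body written as a single insert
theorem stepA_eq :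
    (fun (md : PySem.Dict String Int) (p : String × Int) =>
      if md.contains p.1 = false then md.insert p.1 p.2
      else md.insert p.1 (min (md.getD p.1 0) p.2))
    = fun md p => md.insert p.1
        (if md.contains p.1 = false then p.2 else min (md.getD p.1 0) p.2) := by
  funext md p
  by_cases h : md.contains p.1 = false <;> simp [h]

def optMinFold (o : Option Int) (vs : List Int) : Option Int :=
  vs.foldl (fun o v => some (match o with | none => v | some m => min m v)) o

theorem optMinFold_some (vs : List Int) (m : Int) :
    optMinFold (some m) vs = some (vs.foldl min m) := by
  induction vs generalizing m with
  | nil => rfl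
  | cons v vs ih => simp [optMinFold, List.foldl_cons] at ih ⊢; exact ih _

theorem get?_foldl_stepA (L : List (String × Int)) (d : PySem.Dict String Int) (k : String) :
    (L.foldl (fun md p =>
        if md.contains p.1 = false then md.insert p.1 p.2
        else md.insert p.1 (min (md.getD p.1 0) p.2)) d).get? k
    = optMinFold (d.get? k) ((L.filter (fun p => p.1 == k)).map (·.2)) := by
  induction L generalizing d with
  | nil => rfl
  | cons a L ih =>
    rw [List.foldl_cons, ih]
    by_cases hk : a.1 = k
    · have hfilt : (a :: L).filter (fun p => p.1 == k) = a :: L.filter (fun p => p.1 == k) := by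
        simp [hk]
      rw [hfilt, List.map_cons]
      have hd' : (if d.contains a.1 = false then d.insert a.1 a.2
          else d.insert a.1 (min (d.getD a.1 0) a.2)).get? k
          = some (match d.get? k with | none => a.2 | some m => min m a.2) := by
        subst hk
        rw [PySem.Dict.contains_eq_isSome_get?, PySem.Dict.getD_eq_get?_getD]
        cases h : d.get? a.1 <;> simp [PySem.Dict.get?_insert_self]
      rw [hd']
      rfl
    · have hfilt : (a :: L).filter (fun p => p.1 == k) = L.filter (fun p => p.1 == k) := by
        simp [hk]
      rw [hfilt]
      have hd' : (if d.contains a.1 = false then d.insert a.1 a.2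
          else d.insert a.1 (min (d.getD a.1 0) a.2)).get? k = d.get? k := by
        have hne : k ≠ a.1 := fun h => hk h.symm
        by_cases h : d.contains a.1 = false <;>
          simp [h, PySem.Dict.get?_insert_of_ne _ _ hne]
      rw [hd']

theorem process_spec_aux (api_results : List (List (String × Int))) :
    process api_results = process_alt api_results := by
  unfold process process_alt
  dsimp only
  rw [foldl_foldl_flatMap, foldl_foldl_flatMap]
  set L : List (String × Int) :=
    api_results.flatMap (fun r => (PySem.Dict.ofList r).items) with hL
  -- key lists of both dicts
  have hkeysA : (L.foldl (fun md p =>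
      if md.contains p.1 = false then md.insert p.1 p.2
      else md.insert p.1 (min (md.getD p.1 0) p.2)) PySem.Dict.empty).keys
      = PySem.Set.ofList (L.map (·.1)) := by
    rw [stepA_eq, PySem.Dict.keys_foldl_insert_key, PySem.Dict.keys_empty,
      PySem.Set.update_nil_left]
  have hkeysB : (L.foldl (fun d p => d.modify p.1 [] fun x => x ++ [p.2])
      PySem.Dict.empty).keys = PySem.Set.ofList (L.map (·.1)) := by
    rw [PySem.Dict.keys_foldl_modify_key L (·.1) [] (fun _ p x => x ++ [p.2]),
      PySem.Dict.keys_empty, PySem.Set.update_nil_left]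
  have hndA : (L.foldl (fun md p =>
      if md.contains p.1 = false then md.insert p.1 p.2
      else md.insert p.1 (min (md.getD p.1 0) p.2)) PySem.Dict.empty).keys.Nodup := by
    rw [hkeysA]; exact PySem.Set.nodup_ofList _
  have hndB : (L.foldl (fun d p => d.modify p.1 [] fun x => x ++ [p.2])
      PySem.Dict.empty).keys.Nodup := by
    rw [hkeysB]; exact PySem.Set.nodup_ofList _
  rw [PySem.Dict.items_eq_map_keys _ hndA 0, PySem.Dict.items_eq_map_keys _ hndB [],
    hkeysA, hkeysB, List.map_map]
  apply List.map_congr_left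
  intro k hk
  have hkmem : k ∈ L.map (·.1) := (PySem.Set.mem_ofList _ _).mp hk
  obtain ⟨p, hpL, hpk⟩ := List.mem_map.mp hkmem
  -- the list of all values grouped under k is nonempty
  have hpf : p ∈ L.filter (fun p => p.1 == k) := by
    simp [List.mem_filter, hpL, hpk]
  obtain ⟨h, t, hft⟩ : ∃ h t, (L.filter (fun p => p.1 == k)).map (·.2) = h :: t := by
    cases hf : (L.filter (fun p => p.1 == k)).map (·.2) with
    | nil =>
      exact absurd (List.mem_map_of_mem hpf (f := (·.2))) (by simp [hf])
    | cons h t => exact ⟨h, t, rfl⟩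
  have hA : (L.foldl (fun md p =>
      if md.contains p.1 = false then md.insert p.1 p.2
      else md.insert p.1 (min (md.getD p.1 0) p.2)) PySem.Dict.empty).getD k 0
      = pyMinList ((L.filter (fun p => p.1 == k)).map (·.2)) := by
    rw [PySem.Dict.getD_eq_get?_getD, get?_foldl_stepA, PySem.Dict.get?_empty, hft]
    show (optMinFold (some h) t).getD 0 = _
    rw [optMinFold_some]
    rfl
  have hB : (L.foldl (fun d p => d.modify p.1 [] fun x => x ++ [p.2])
      PySem.Dict.empty).getD k []
      = (L.filter (fun p => p.1 == k)).map (·.2) := by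
    rw [PySem.Dict.getD_foldl_modify_append, PySem.Dict.getD_empty]
    rfl
  simp only [Function.comp, hA, hB]

-- ===== VERDICT (by name: the statement is the Claim_ definition above) =====
theorem process_spec : Claim_equal_process := by
  intro api_results _
  exact process_spec_aux api_results
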